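-- pv_equiv track=rewrite | github.com/HenryVarro666/DensityMap-GyralNet | GDM_Test/GDM_0.3.py | find_the_max_patchSize_candidate_connection
-- ===== SOURCE A (Python) =====
-- def find_the_max_patchSize_candidate_connection(point_patchSize_dict_updated, connected_candidate_dict):
--     max = -1
--     candidate_connection_list = list()
--     for point in connected_candidate_dict.keys():
--         if point_patchSize_dict_updated[point] > max:
--             max = point_patchSize_dict_updated[point]
--             candidate_connection_list = connected_candidate_dict[point]
--         elif point_patchSize_dict_updated[point] == max:
--             candidate_connection_list = candidate_connection_list + connected_candidate_dict[point]
--     if len(candidate_connection_list) == 1: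
--         candidate_connection = candidate_connection_list[0]
--     else:
--         max = -1
--         for candidate in candidate_connection_list:
--             if point_patchSize_dict_updated[candidate[1]] > max:
--                 max = point_patchSize_dict_updated[candidate[1]]
--                 candidate_connection = candidate
--
--     return candidate_connection
-- ===== SOURCE B (Python) =====
-- def find_the_max_patchSize_candidate_connection(point_patchSize_dict_updated, connected_candidate_dict):
--     best = -1
--     for point in connected_candidate_dict:
--         size = point_patchSize_dict_updated[point]
--         if size > best:
--             best = size
--     candidates = []
--     for point in connected_candidate_dict:
--         if point_patchSize_dict_updated[point] == best:
--             candidates.extend(connected_candidate_dict[point])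
--     if len(candidates) == 1:
--         return candidates[0]
--     return max(candidates, key=lambda candidate: point_patchSize_dict_updated[candidate[1]])
-- ===== Notes on version B (the rewrite author's own statement) =====
-- stated objective: simpler
-- what changed: Phase 1's replace-or-concatenate state machine is split into a global-max pass plus a collect pass, and phase 2's manual running-max loop is replaced by the builtin max(key=...) (first-maximum semantics).
import Mathlib
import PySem

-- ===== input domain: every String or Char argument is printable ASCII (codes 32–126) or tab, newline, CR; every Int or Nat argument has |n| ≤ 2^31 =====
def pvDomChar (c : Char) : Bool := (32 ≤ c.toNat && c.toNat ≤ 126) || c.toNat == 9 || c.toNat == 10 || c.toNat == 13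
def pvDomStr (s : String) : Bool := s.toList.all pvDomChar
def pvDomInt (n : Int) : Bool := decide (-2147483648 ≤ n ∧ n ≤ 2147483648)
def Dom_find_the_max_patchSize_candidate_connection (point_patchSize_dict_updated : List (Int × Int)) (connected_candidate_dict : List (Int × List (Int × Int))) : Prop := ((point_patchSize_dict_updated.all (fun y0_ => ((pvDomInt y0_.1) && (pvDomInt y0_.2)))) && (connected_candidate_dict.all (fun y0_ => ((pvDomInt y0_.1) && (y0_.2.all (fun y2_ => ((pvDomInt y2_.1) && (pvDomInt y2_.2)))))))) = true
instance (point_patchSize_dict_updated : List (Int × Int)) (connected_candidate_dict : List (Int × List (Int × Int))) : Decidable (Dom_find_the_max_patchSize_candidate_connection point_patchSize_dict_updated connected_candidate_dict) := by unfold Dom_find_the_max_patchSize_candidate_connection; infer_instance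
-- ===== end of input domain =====

-- ===== PORT A =====
-- B differs from A only in decomposition: A's = B's return value on every input where A returns (Pre_).
def find_the_max_patchSize_candidate_connection (point_patchSize_dict_updated : List (Int × Int)) (connected_candidate_dict : List (Int × List (Int × Int))) : Int × Int :=
  let patch := PySem.Dict.ofList point_patchSize_dict_updated
  let cdict := PySem.Dict.ofList connected_candidate_dict
  -- for point in connected_candidate_dict.keys(): running (max, candidate_connection_list)
  let s := cdict.keys.foldl (fun s point =>
      if patch.getD point 0 > s.1 then (patch.getD point 0, cdict.getD point [])
      else if patch.getD point 0 == s.1 then (s.1, s.2 ++ cdict.getD point [])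
      else s) ((-1 : Int), ([] : List (Int × Int)))
  let lst := s.2
  if lst.length == 1 then (PySem.List.pyGet? lst 0).getD (0, 0)
  else
    -- second loop; candidate_connection modelled as Option (none = UnboundLocalError, excluded by Pre_)
    let r := lst.foldl (fun t c =>
        if patch.getD c.2 0 > t.1 then (patch.getD c.2 0, some c) else t)
        ((-1 : Int), (none : Option (Int × Int)))
    r.2.getD (0, 0)

-- ===== PORT B =====
def find_the_max_patchSize_candidate_connection_alt (point_patchSize_dict_updated : List (Int × Int)) (connected_candidate_dict : List (Int × List (Int × Int))) : Int × Int :=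
  let patch := PySem.Dict.ofList point_patchSize_dict_updated
  let cdict := PySem.Dict.ofList connected_candidate_dict
  -- pass 1: global maximum patch size over the keys
  let best := cdict.keys.foldl (fun b point =>
      if patch.getD point 0 > b then patch.getD point 0 else b) (-1 : Int)
  -- pass 2: collect the candidate lists of the keys attaining it
  let candidates := cdict.keys.foldl (fun acc point =>
      if patch.getD point 0 == best then acc ++ cdict.getD point [] else acc) ([] : List (Int × Int))
  if candidates.length == 1 then (PySem.List.pyGet? candidates 0).getD (0, 0)
  else (PySem.List.max? candidates (fun c => patch.getD c.2 0)).getD (0, 0)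

-- ===== PRECONDITION & SPEC =====
-- the maximal patch size over the candidate keys (running max from -1, as both Pythons start)
def pvMax_fmpcc (point_patchSize_dict_updated : List (Int × Int)) (connected_candidate_dict : List (Int × List (Int × Int))) : Int :=
  (PySem.Dict.ofList connected_candidate_dict).keys.foldl
    (fun a p => max a ((PySem.Dict.ofList point_patchSize_dict_updated).getD p 0)) (-1)

-- the concatenated candidate lists of the keys attaining that maximum
def pvList_fmpcc (point_patchSize_dict_updated : List (Int × Int)) (connected_candidate_dict : List (Int × List (Int × Int))) : List (Int × Int) :=
  ((PySem.Dict.ofList connected_candidate_dict).keys.filter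
      (fun p => (PySem.Dict.ofList point_patchSize_dict_updated).getD p 0 ==
        pvMax_fmpcc point_patchSize_dict_updated connected_candidate_dict)).flatMap
    (fun p => (PySem.Dict.ofList connected_candidate_dict).getD p [])

-- Pre_ = exactly the inputs where A returns: every candidate key has a patch size (else KeyError),
-- and either the collected list is a singleton or all its second components have a patch size
-- (else KeyError) with at least one > -1 (else candidate_connection stays unbound: UnboundLocalError).
def Pre_find_the_max_patchSize_candidate_connection (point_patchSize_dict_updated : List (Int × Int)) (connected_candidate_dict : List (Int × List (Int × Int))) : Prop :=
  (∀ p ∈ (PySem.Dict.ofList connected_candidate_dict).keys,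
      (PySem.Dict.ofList point_patchSize_dict_updated).contains p = true) ∧
  ((pvList_fmpcc point_patchSize_dict_updated connected_candidate_dict).length = 1 ∨
    ((∀ c ∈ pvList_fmpcc point_patchSize_dict_updated connected_candidate_dict,
        (PySem.Dict.ofList point_patchSize_dict_updated).contains c.2 = true) ∧
      ∃ c ∈ pvList_fmpcc point_patchSize_dict_updated connected_candidate_dict,
        (PySem.Dict.ofList point_patchSize_dict_updated).getD c.2 0 > -1))
instance (point_patchSize_dict_updated : List (Int × Int)) (connected_candidate_dict : List (Int × List (Int × Int))) : Decidable (Pre_find_the_max_patchSize_candidate_connection point_patchSize_dict_updated connected_candidate_dict) := by unfold Pre_find_the_max_patchSize_candidate_connection; infer_instance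

def pvWitness_find_the_max_patchSize_candidate_connection : (List (Int × Int)) × (List (Int × List (Int × Int))) :=
  ([(1, 5), (2, 7)], [(1, [(0, 2)]), (2, [(0, 1), (3, 1)])])

def Spec_find_the_max_patchSize_candidate_connection (point_patchSize_dict_updated : List (Int × Int)) (connected_candidate_dict : List (Int × List (Int × Int))) (out : Int × Int) : Prop := out = find_the_max_patchSize_candidate_connection_alt point_patchSize_dict_updated connected_candidate_dict
instance (point_patchSize_dict_updated : List (Int × Int)) (connected_candidate_dict : List (Int × List (Int × Int))) (out : Int × Int) : Decidable (Spec_find_the_max_patchSize_candidate_connection point_patchSize_dict_updated connected_candidate_dict out) := by unfold Spec_find_the_max_patchSize_candidate_connection; infer_instance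

-- ===== CLAIM (what is proved, stated in full; the proofs are below) =====
def Claim_equal_find_the_max_patchSize_candidate_connection : Prop := ∀ (point_patchSize_dict_updated : List (Int × Int)) (connected_candidate_dict : List (Int × List (Int × Int))), Dom_find_the_max_patchSize_candidate_connection point_patchSize_dict_updated connected_candidate_dict → Pre_find_the_max_patchSize_candidate_connection point_patchSize_dict_updated connected_candidate_dict → Spec_find_the_max_patchSize_candidate_connection point_patchSize_dict_updated connected_candidate_dict (find_the_max_patchSize_candidate_connection point_patchSize_dict_updated connected_candidate_dict)

-- ===== LEMMAS AND PROOFS =====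
-- the step of Python's max(..., key=...) (PySem.List.max?), as a named function so rewrites line up
def pvMaxStep (key : (Int × Int) → Int) (acc : Option (Int × Int)) (x : Int × Int) : Option (Int × Int) :=
  match acc with
  | none => some x
  | some m => if key m < key x then some x else some m

theorem pv_max?_eq_foldl (key : (Int × Int) → Int) (L : List (Int × Int)) :
    PySem.List.max? L key = L.foldl (pvMaxStep key) none := by
  unfold PySem.List.max?
  congr 1
  funext acc x
  cases acc <;> rfl

-- A's phase-1 loop computes (running max, concatenation of the lists of the keys attaining it)
theorem pv_phase1A (v : Int → Int) (w : Int → List (Int × Int)) :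
    ∀ (ks : List Int) (m : Int) (l : List (Int × Int)),
      ks.foldl (fun s p => if v p > s.1 then (v p, w p)
          else if v p == s.1 then (s.1, s.2 ++ w p) else s) (m, l)
      = (ks.foldl (fun a p => max a (v p)) m,
         (if ks.foldl (fun a p => max a (v p)) m = m then l else [])
           ++ (ks.filter (fun p => v p == ks.foldl (fun a p => max a (v p)) m)).flatMap w) := by
  intro ks
  induction ks with
  | nil => intro m l; simp
  | cons p t ih =>
    intro m l
    have hle : ∀ (a : Int), a ≤ t.foldl (fun a q => max a (v q)) a :=
      fun a => (PySem.List.le_foldl_max_int t v a).1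
    simp only [List.foldl_cons, List.filter_cons]
    by_cases h1 : v p > m
    · rw [if_pos h1, ih]
      have hm : max m (v p) = v p := by omega
      simp only [hm]
      have hM : v p ≤ t.foldl (fun a q => max a (v q)) (v p) := hle (v p)
      by_cases h2 : t.foldl (fun a q => max a (v q)) (v p) = v p
      · simp [h2, show ¬ (v p = m) by omega]
      · simp [h2, show ¬ (t.foldl (fun a q => max a (v q)) (v p) = m) by omega,
          show (v p == t.foldl (fun a q => max a (v q)) (v p)) = false by
            simp; omega]
    · rw [if_neg h1]
      by_cases h2 : v p == m
      · have hvm : v p = m := by simpa using h2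
        rw [if_pos h2, ih]
        have hm : max m (v p) = m := by omega
        simp only [hvm]
        by_cases h3 : t.foldl (fun a q => max a (v q)) m = m
        · simp [h3, List.append_assoc]
        · simp [h3, show (m == t.foldl (fun a q => max a (v q)) m) = false by simp; omega]
      · have hvm : ¬ (v p = m) := by simpa using h2
        rw [if_neg h2, ih]
        have hm : max m (v p) = m := by omega
        simp only [hm]
        have hM : m ≤ t.foldl (fun a q => max a (v q)) m := hle m
        simp [show (v p == t.foldl (fun a q => max a (v q)) m) = false by simp; omega]

-- any list with a distinguished element splits at its FIRST element satisfying the predicate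
theorem pv_split (key : (Int × Int) → Int) :
    ∀ (L : List (Int × Int)), (∃ c ∈ L, key c > -1) →
      ∃ P c S, L = P ++ c :: S ∧ (∀ p ∈ P, ¬ key p > -1) ∧ key c > -1 := by
  intro L
  induction L with
  | nil => intro h; simp at h
  | cons x t ih =>
    intro h
    by_cases hx : key x > -1
    · exact ⟨[], x, t, rfl, by simp, hx⟩
    · obtain ⟨c0, hc0, hk0⟩ := h
      have hc0t : c0 ∈ t := by
        rcases List.mem_cons.mp hc0 with h' | h'
        · subst h'; exact absurd hk0 hx
        · exact h'
      obtain ⟨P, c, S, hPS, hP, hc⟩ := ih ⟨c0, hc0t, hk0⟩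
      refine ⟨x :: P, c, S, by simp [hPS], ?_, hc⟩
      intro p hp
      rcases List.mem_cons.mp hp with h' | h'
      · subst h'; exact hx
      · exact hP p h'

-- from a bound state, A's phase-2 loop and the max? fold move in lockstep
theorem pv_phase2_bound (key : (Int × Int) → Int) :
    ∀ (S : List (Int × Int)) (c : Int × Int),
      ∃ m, S.foldl (pvMaxStep key) (some c) = some m ∧
        S.foldl (fun t x => if key x > t.1 then (key x, some x) else t) (key c, some c)
            = (key m, some m) := by
  intro S
  induction S with
  | nil => intro c; exact ⟨c, rfl, rfl⟩
  | cons x t ih =>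
    intro c
    by_cases h : key c < key x
    · obtain ⟨m, h1, h2⟩ := ih x
      exact ⟨m, by simpa [pvMaxStep, h] using h1, by simpa [show key x > key c from h] using h2⟩
    · obtain ⟨m, h1, h2⟩ := ih c
      exact ⟨m, by simpa [pvMaxStep, h] using h1, by simpa [show ¬ (key x > key c) from h] using h2⟩

-- while no element exceeds -1, A's phase-2 state stays ((-1), none)
theorem pv_phase2_prefix (key : (Int × Int) → Int) :
    ∀ (P : List (Int × Int)), (∀ p ∈ P, ¬ key p > -1) →
      P.foldl (fun t x => if key x > t.1 then (key x, some x) else t)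
          ((-1 : Int), (none : Option (Int × Int))) = (-1, none) := by
  intro P
  induction P with
  | nil => intro _; rfl
  | cons x t ih =>
    intro h
    have hx : ¬ key x > -1 := h x (by simp)
    simp only [List.foldl_cons, if_neg hx]
    exact ih (fun p hp => h p (by simp [hp]))

-- while no element exceeds -1, the max? fold carries an element with key ≤ -1 (or none)
theorem pv_max_prefix (key : (Int × Int) → Int) :
    ∀ (P : List (Int × Int)) (acc : Option (Int × Int)),
      (∀ q, acc = some q → key q ≤ -1) → (∀ p ∈ P, key p ≤ -1) →
      ∀ q, P.foldl (pvMaxStep key) acc = some q → key q ≤ -1 := by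
  intro P
  induction P with
  | nil => intro acc h _ q hq; exact h q hq
  | cons x t ih =>
    intro acc h hP q hq
    refine ih _ ?_ (fun p hp => hP p (by simp [hp])) q hq
    intro r hr
    match acc, hr with
    | none, hr => simp [pvMaxStep] at hr; subst hr; exact hP x (by simp)
    | some m, hr =>
      by_cases hc : key m < key x
      · simp [pvMaxStep, hc] at hr; subst hr; exact hP x (by simp)
      · simp [pvMaxStep, hc] at hr; subst hr; exact h m rfl

-- A's whole phase 2 agrees with max? when some element has key > -1
theorem pv_phase2_eq_max? (key : (Int × Int) → Int) (L : List (Int × Int))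
    (h : ∃ c ∈ L, key c > -1) :
    (L.foldl (fun t x => if key x > t.1 then (key x, some x) else t)
        ((-1 : Int), (none : Option (Int × Int)))).2 = PySem.List.max? L key := by
  obtain ⟨P, c, S, rfl, hP, hc⟩ := pv_split key L h
  rw [pv_max?_eq_foldl]
  rw [List.foldl_append, List.foldl_append, pv_phase2_prefix key P hP]
  have hacc : ∀ q, P.foldl (pvMaxStep key) none = some q → key q ≤ -1 :=
    pv_max_prefix key P none (by simp) (fun p hp => by have := hP p hp; omega)
  obtain ⟨m', h1, h2⟩ := pv_phase2_bound key S c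
  rcases hq : P.foldl (pvMaxStep key) (none : Option (Int × Int)) with _ | m
  · simp only [List.foldl_cons, if_pos hc,
      show pvMaxStep key none c = some c from rfl]
    rw [h1, h2]
  · have hm : key m ≤ -1 := hacc m hq
    simp only [List.foldl_cons, if_pos hc,
      show pvMaxStep key (some m) c = some c by simp [pvMaxStep]; omega]
    rw [h1, h2]

-- ===== VERDICT (by name: the statement is the Claim_ definition above) =====
theorem find_the_max_patchSize_candidate_connection_spec : Claim_equal_find_the_max_patchSize_candidate_connection := by
  intro ppd ccd _ hpre
  obtain ⟨_hkeys, hph2⟩ := hpre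
  unfold Spec_find_the_max_patchSize_candidate_connection
  unfold find_the_max_patchSize_candidate_connection find_the_max_patchSize_candidate_connection_alt
  simp only []
  have hbest : (PySem.Dict.ofList ccd).keys.foldl
      (fun b point => if (PySem.Dict.ofList ppd).getD point 0 > b
        then (PySem.Dict.ofList ppd).getD point 0 else b) (-1)
      = (PySem.Dict.ofList ccd).keys.foldl
      (fun a p => max a ((PySem.Dict.ofList ppd).getD p 0)) (-1) := by
    apply PySem.List.foldl_congr_mem
    intro acc x _
    rw [max_def]
    split_ifs <;> omega
  rw [pv_phase1A, hbest,
    PySem.List.foldl_if_eq_foldl_filter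
      (p := fun point => (PySem.Dict.ofList ppd).getD point 0 ==
        (PySem.Dict.ofList ccd).keys.foldl
          (fun a p => max a ((PySem.Dict.ofList ppd).getD p 0)) (-1))
      (f := fun acc point => acc ++ (PySem.Dict.ofList ccd).getD point []),
    PySem.List.foldl_append_eq_flatMap]
  simp only [ite_self, List.nil_append]
  have hL : pvList_fmpcc ppd ccd =
      ((PySem.Dict.ofList ccd).keys.filter
        (fun p => (PySem.Dict.ofList ppd).getD p 0 ==
          (PySem.Dict.ofList ccd).keys.foldl
            (fun a p => max a ((PySem.Dict.ofList ppd).getD p 0)) (-1))).flatMap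
      (fun p => (PySem.Dict.ofList ccd).getD p []) := rfl
  rw [← hL]
  by_cases hlen : (pvList_fmpcc ppd ccd).length == 1
  · rw [if_pos hlen, if_pos hlen]
  · rw [if_neg hlen, if_neg hlen]
    have hx : ∃ c ∈ pvList_fmpcc ppd ccd, (PySem.Dict.ofList ppd).getD c.2 0 > -1 := by
      rcases hph2 with h1 | ⟨_, h2⟩
      · exact absurd (by simpa using h1) (by simpa using hlen)
      · exact h2
    rw [pv_phase2_eq_max? (fun c => (PySem.Dict.ofList ppd).getD c.2 0)
      (pvList_fmpcc ppd ccd) hx]
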